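-- pv_equiv track=rewrite | github.com/dinyarislam/Python-Code-Samples | HW03.py | tennisMatch
-- ===== SOURCE A (Python) =====
-- def tennisMatch(player1,player2,matchrecord):
--     pl1score = 0
--     pl2score = 0
--     pl1game = 0
--     pl2game = 0
--     for ch in matchrecord:
--         if ch == '-':
--             if pl1score > pl2score:
--                 pl1game += 1
--             elif pl2score > pl1score:
--                 pl2game += 1
--             pl1score = 0
--             pl2score = 0
--             continue
--         if ch == '1':
--             pl1score += 1
--         elif ch == '2':
--             pl2score += 1
--     if pl1game > pl2game:
--         winnerstr = "{} won! The score was {}-{}.".format(player1, pl1game, pl2game)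
--         return winnerstr
--     elif pl2game > pl1game:
--         winnerstr = "{} won! The score was {}-{}.".format(player2, pl2game, pl1game)
--         return winnerstr
--     else:
--         return "It's a tie!"
-- ===== SOURCE B (Python) =====
-- def tennisMatch(player1, player2, matchrecord):
--     pl1game = 0
--     pl2game = 0
--     for game in matchrecord.split('-')[:-1]:
--         c1 = game.count('1')
--         c2 = game.count('2')
--         if c1 > c2:
--             pl1game += 1
--         elif c2 > c1:
--             pl2game += 1
--     if pl1game > pl2game:
--         return "{} won! The score was {}-{}.".format(player1, pl1game, pl2game)
--     elif pl2game > pl1game: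
--         return "{} won! The score was {}-{}.".format(player2, pl2game, pl1game)
--     else:
--         return "It's a tie!"
-- ===== Notes on version B (the rewrite author's own statement) =====
-- stated objective: idiomatic
-- what changed: B replaces A's character-by-character score state machine (running scores reset on each '-') by splitting the record on '-', dropping the unterminated last fragment, and counting '1'/'2' per game with str.count.
import Mathlib
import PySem

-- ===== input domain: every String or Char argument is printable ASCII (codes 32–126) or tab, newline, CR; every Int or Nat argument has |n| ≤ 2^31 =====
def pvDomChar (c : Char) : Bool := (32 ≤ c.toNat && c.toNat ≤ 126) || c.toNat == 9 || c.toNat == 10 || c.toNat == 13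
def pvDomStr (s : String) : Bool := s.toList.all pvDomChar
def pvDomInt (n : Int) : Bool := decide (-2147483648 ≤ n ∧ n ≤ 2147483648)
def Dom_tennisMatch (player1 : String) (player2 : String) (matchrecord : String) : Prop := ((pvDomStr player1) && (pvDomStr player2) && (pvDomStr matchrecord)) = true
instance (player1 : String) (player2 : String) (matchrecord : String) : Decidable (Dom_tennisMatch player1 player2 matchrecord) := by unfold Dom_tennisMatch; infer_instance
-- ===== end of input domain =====

-- B replaces A's per-character score state machine by split('-')[:-1] + per-game '1'/'2' counts (idiomatic; same cost).

-- ===== PORT A =====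
-- one step of A's for-loop over the characters; state = (pl1score, pl2score, pl1game, pl2game)
def tennisStepA (st : Int × Int × Int × Int) (ch : Char) : Int × Int × Int × Int :=
  let (s1, s2, g1, g2) := st
  if ch = '-' then
    if s1 > s2 then (0, 0, g1 + 1, g2)
    else if s2 > s1 then (0, 0, g1, g2 + 1)
    else (0, 0, g1, g2)
  else if ch = '1' then (s1 + 1, s2, g1, g2)
  else if ch = '2' then (s1, s2 + 1, g1, g2)
  else st

def tennisMatch (player1 : String) (player2 : String) (matchrecord : String) : String :=
  let st := matchrecord.toList.foldl tennisStepA (0, 0, 0, 0)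
  let g1 := st.2.2.1
  let g2 := st.2.2.2
  if g1 > g2 then
    player1 ++ " won! The score was " ++ PySem.Int.toStr g1 ++ "-" ++ PySem.Int.toStr g2 ++ "."
  else if g2 > g1 then
    player2 ++ " won! The score was " ++ PySem.Int.toStr g2 ++ "-" ++ PySem.Int.toStr g1 ++ "."
  else "It's a tie!"

-- ===== PORT B =====
-- one game of B's for-loop: tally the game to whoever has more '1's resp. '2's
def tennisStepB (p : Int × Int) (game : List Char) : Int × Int :=
  let c1 := PySem.Chars.count game ['1']
  let c2 := PySem.Chars.count game ['2']
  if c1 > c2 then (p.1 + 1, p.2)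
  else if c2 > c1 then (p.1, p.2 + 1)
  else p

def tennisMatch_alt (player1 : String) (player2 : String) (matchrecord : String) : String :=
  -- matchrecord.split('-')[:-1]  (split with non-empty separator = Chars.splitOn; [:-1] = slice)
  let games := PySem.List.slice (PySem.Chars.splitOn matchrecord.toList ['-']) none (some (-1))
  let p := games.foldl tennisStepB (0, 0)
  if p.1 > p.2 then
    player1 ++ " won! The score was " ++ PySem.Int.toStr p.1 ++ "-" ++ PySem.Int.toStr p.2 ++ "."
  else if p.2 > p.1 then
    player2 ++ " won! The score was " ++ PySem.Int.toStr p.2 ++ "-" ++ PySem.Int.toStr p.1 ++ "."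
  else "It's a tie!"

-- ===== PRECONDITION & SPEC =====
def Spec_tennisMatch (player1 : String) (player2 : String) (matchrecord : String) (out : String) : Prop := out = tennisMatch_alt player1 player2 matchrecord
instance (player1 : String) (player2 : String) (matchrecord : String) (out : String) : Decidable (Spec_tennisMatch player1 player2 matchrecord out) := by unfold Spec_tennisMatch; infer_instance

-- ===== CLAIM (what is proved, stated in full; the proofs are below) =====
def Claim_equal_tennisMatch : Prop := ∀ (player1 : String) (player2 : String) (matchrecord : String), Dom_tennisMatch player1 player2 matchrecord → Spec_tennisMatch player1 player2 matchrecord (tennisMatch player1 player2 matchrecord)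

-- ===== LEMMAS AND PROOFS =====

-- recursive characterisation of split on a single-char separator: pre = the current fragment so far
def mySplit (pre : List Char) : List Char → List (List Char)
  | [] => [pre]
  | c :: rest => if c = '-' then pre :: mySplit [] rest else mySplit (pre ++ [c]) rest

theorem count_go_singleton (c : Char) : ∀ (l : List Char) (fuel acc : Nat), l.length ≤ fuel →
    PySem.Chars.count.go [c] fuel l acc = acc + l.count c := by
  intro l
  induction l with
  | nil => intro fuel acc _; cases fuel <;> simp [PySem.Chars.count.go]
  | cons a rest ih =>
    intro fuel acc h
    cases fuel with
    | zero => simp at h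
    | succ f =>
      simp only [PySem.Chars.count.go, List.isPrefixOf, Bool.and_true, List.length_cons,
        List.length_nil, Nat.zero_add, List.drop_succ_cons, List.drop_zero]
      by_cases hac : c = a
      · subst hac
        rw [if_pos (by simp)]
        rw [ih f (acc + 1) (by simpa using h)]
        simp [List.count_cons]
        omega
      · rw [if_neg (by simp [hac])]
        rw [ih f acc (by simpa using h)]
        simp [List.count_cons]
        exact fun hh => hac hh.symm

theorem count_singleton (l : List Char) (c : Char) :
    PySem.Chars.count l [c] = l.count c := by
  simp [PySem.Chars.count, count_go_singleton c l l.length 0 (le_refl _)]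

theorem splitOn_go_eq (cs : List Char) : ∀ (fuel : Nat) (cur : List Char) (acc : List (List Char)),
    cs.length ≤ fuel →
    PySem.Chars.splitOn.go ['-'] fuel cs cur acc = acc.reverse ++ mySplit cur.reverse cs := by
  induction cs with
  | nil => intro fuel cur acc _; cases fuel <;> simp [PySem.Chars.splitOn.go, mySplit]
  | cons a rest ih =>
    intro fuel cur acc h
    cases fuel with
    | zero => simp at h
    | succ f =>
      simp only [PySem.Chars.splitOn.go, List.isPrefixOf, Bool.and_true, List.length_cons,
        List.length_nil, Nat.zero_add, List.drop_succ_cons, List.drop_zero]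
      by_cases hac : a = '-'
      · subst hac
        rw [if_pos (by simp)]
        rw [ih f [] (cur.reverse :: acc) (by simpa using h)]
        simp [mySplit]
      · rw [if_neg (by simp; intro hh; exact absurd hh.symm hac)]
        rw [ih f (a :: cur) acc (by simpa using h)]
        simp [mySplit, hac]

theorem splitOn_eq_mySplit (cs : List Char) :
    PySem.Chars.splitOn cs ['-'] = mySplit [] cs := by
  simp [PySem.Chars.splitOn, splitOn_go_eq cs (cs.length + 1) [] [] (by omega)]

theorem mySplit_ne_nil (cs : List Char) : ∀ pre, mySplit pre cs ≠ [] := by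
  induction cs with
  | nil => intro pre; simp [mySplit]
  | cons a rest ih =>
    intro pre
    by_cases h : a = '-' <;> simp [mySplit, h, ih]

theorem main_fold (cs : List Char) : ∀ (pre : List Char) (g1 g2 : Int),
    (cs.foldl tennisStepA ((pre.count '1' : Int), (pre.count '2' : Int), g1, g2)).2.2 =
      (mySplit pre cs).dropLast.foldl tennisStepB (g1, g2) := by
  induction cs with
  | nil => intro pre g1 g2; simp [mySplit]
  | cons a rest ih =>
    intro pre g1 g2
    by_cases h : a = '-'
    · subst h
      have hd : (mySplit pre ('-' :: rest)).dropLast = pre :: (mySplit [] rest).dropLast := by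
        rw [show mySplit pre ('-' :: rest) = pre :: mySplit [] rest from by simp [mySplit]]
        rw [List.dropLast_cons_of_ne_nil (mySplit_ne_nil rest [])]
      rw [hd]
      simp only [List.foldl_cons]
      have hstep : tennisStepA ((pre.count '1' : Int), (pre.count '2' : Int), g1, g2) '-' =
          ((0 : Int), (0 : Int), (tennisStepB (g1, g2) pre).1, (tennisStepB (g1, g2) pre).2) := by
        simp only [tennisStepA, tennisStepB, count_singleton]
        split_ifs with h1 h2 h3 h4 h5 <;> first | rfl | (exfalso; omega)
      rw [hstep]
      have := ih [] (tennisStepB (g1, g2) pre).1 (tennisStepB (g1, g2) pre).2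
      simpa using this
    · have hd : mySplit pre (a :: rest) = mySplit (pre ++ [a]) rest := by
        simp [mySplit, h]
      rw [hd]
      have hstep : tennisStepA ((pre.count '1' : Int), (pre.count '2' : Int), g1, g2) a =
          (((pre ++ [a]).count '1' : Int), ((pre ++ [a]).count '2' : Int), g1, g2) := by
        simp only [tennisStepA, if_neg h]
        by_cases h1 : a = '1'
        · subst h1; simp [List.count_append]
        · by_cases h2 : a = '2'
          · subst h2; simp [List.count_append]
          · simp [h1, h2, List.count_append]
      simp only [List.foldl_cons, hstep]
      exact ih (pre ++ [a]) g1 g2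

-- ===== VERDICT (by name: the statement is the Claim_ definition above) =====
theorem tennisMatch_spec : Claim_equal_tennisMatch := by
  intro player1 player2 matchrecord _
  unfold Spec_tennisMatch tennisMatch tennisMatch_alt
  rw [splitOn_eq_mySplit, PySem.List.slice_to_neg_one]
  have h := main_fold matchrecord.toList [] 0 0
  simp only [List.count_nil, Nat.cast_zero] at h
  simp only [h]
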